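-- pv_equiv track=rewrite | github.com/floreaadrian/Lftc | Lab2/Main.py | fromFiniteAutomataToRegularGrammar
-- ===== SOURCE A (Python) =====
-- def getSetOfStates(str):
--     states = []
--     for st in str:
--         states.append(st[0])
--     return states[1:]
--
-- def getAlphabet(str):
--     alphabet = []
--     for s in str[0]:
--         alphabet.append(s.strip(" "))
--     return alphabet[1:]
--
-- def fromFiniteAutomataToRegularGrammar(finiteAutomata, setOfFinalStates):
--     regularGrammar = []
--     alphabet = getAlphabet(finiteAutomata)
--     setOfStates = getSetOfStates(finiteAutomata)
--     for i in range(0, len(setOfStates)):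
--         production = setOfStates[i] + "->"
--         for j in range(0, len(alphabet)):
--             listOfState = finiteAutomata[i+1][j+1].split(",")
--             for state in listOfState:
--                 production += alphabet[j] + state + "|"
--         if production[len(production)-1] == '|':
--             production = production[:-1]
--         regularGrammar.append(production)
--     for i in range(0, len(regularGrammar)):
--         if regularGrammar[i].split("->")[0] in setOfFinalStates:
--             regularGrammar[i] += "|epsilon"
--     return regularGrammar
-- ===== SOURCE B (Python) =====
-- def fromFiniteAutomataToRegularGrammar(finiteAutomata, setOfFinalStates):
--     rows = finiteAutomata[1:]
--     # column-major accumulation: process one alphabet symbol (column) at a time,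
--     # extending every state's list of production parts
--     parts = [[] for _ in rows]
--     for j, raw in enumerate(finiteAutomata[0][1:], start=1):
--         symbol = raw.strip(" ")
--         parts = [p + [symbol + t for t in row[j].split(",")]
--                  for p, row in zip(parts, rows)]
--     grammar = []
--     for row, p in zip(rows, parts):
--         production = row[0] + "->" + "|".join(p)
--         if row[0] in setOfFinalStates:
--             production += "|epsilon"
--         grammar.append(production)
--     return grammar
-- ===== Notes on version B (the rewrite author's own statement) =====
-- stated objective: alternative
-- what changed: B traverses the transition table column-major: it keeps a per-state list of production parts and, for each alphabet symbol (column), extends every state's part list at once, then assembles each production in one final zip pass - instead of A's row-major per-state string building with trailing-'|' stripping followed by a second pass that re-splits every production for the epsilon rule.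
-- outside the precondition, e.g. on fromFiniteAutomataToRegularGrammar([['x', 'a'], ['p->q', 'r']], ['p']): A returns ['p->q->ar|epsilon'], B returns ['p->q->ar']
import Mathlib
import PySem

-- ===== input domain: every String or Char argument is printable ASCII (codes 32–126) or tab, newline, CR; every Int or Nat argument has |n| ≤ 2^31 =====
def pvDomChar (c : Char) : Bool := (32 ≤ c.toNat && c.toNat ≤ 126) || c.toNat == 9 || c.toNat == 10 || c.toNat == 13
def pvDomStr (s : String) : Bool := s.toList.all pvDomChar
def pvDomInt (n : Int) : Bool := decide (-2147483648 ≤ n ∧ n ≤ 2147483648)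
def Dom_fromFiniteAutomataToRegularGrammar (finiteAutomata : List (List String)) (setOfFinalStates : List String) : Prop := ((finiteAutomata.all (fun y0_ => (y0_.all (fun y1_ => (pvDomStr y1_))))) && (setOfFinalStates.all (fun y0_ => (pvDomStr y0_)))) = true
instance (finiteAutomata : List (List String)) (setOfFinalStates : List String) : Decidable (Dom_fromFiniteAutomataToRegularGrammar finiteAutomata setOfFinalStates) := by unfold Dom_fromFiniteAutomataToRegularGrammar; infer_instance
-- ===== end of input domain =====

-- ===== PORT A =====
-- B traverses the table column-major with per-state part lists; equivalence is on the return value (A mutates only locals).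
def pvGetSetOfStates (str : List (List String)) : List String :=
  PySem.List.slice (str.foldl (fun states st => states ++ [st.headD ""]) []) (some 1) none

def pvGetAlphabet (str : List (List String)) : List String :=
  PySem.List.slice ((str.headD []).foldl (fun alphabet s => alphabet ++ [PySem.Str.stripChars s " "]) []) (some 1) none

def fromFiniteAutomataToRegularGrammar (finiteAutomata : List (List String)) (setOfFinalStates : List String) : List String :=
  let alphabet := pvGetAlphabet finiteAutomata
  let setOfStates := pvGetSetOfStates finiteAutomata
  let regularGrammar := (PySem.List.pyRange 0 setOfStates.length 1).foldl (fun rg i =>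
    let production := PySem.List.pyGetD setOfStates i "" ++ "->"
    let production := (PySem.List.pyRange 0 alphabet.length 1).foldl (fun production j =>
      let listOfState := (PySem.Str.split? (PySem.List.pyGetD (PySem.List.pyGetD finiteAutomata (i+1) []) (j+1) "") ",").getD []
      listOfState.foldl (fun production state => production ++ PySem.List.pyGetD alphabet j "" ++ state ++ "|") production) production
    let production := if PySem.Str.pyGet? production (PySem.Str.len production - 1) = some '|'
      then PySem.Str.slice production none (some (-1)) else production
    rg ++ [production]) []
  -- A's second pass rewrites regularGrammar[i] in place; the returned list is this map
  regularGrammar.foldl (fun acc g =>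
    acc ++ [if setOfFinalStates.contains (((PySem.Str.split? g "->").getD []).headD "") then g ++ "|epsilon" else g]) []

-- ===== PORT B =====
-- column-major: parts[i] collects state i's "symbol+target" pieces, one alphabet column at a time
def fromFiniteAutomataToRegularGrammar_alt (finiteAutomata : List (List String)) (setOfFinalStates : List String) : List String :=
  let rows := PySem.List.slice finiteAutomata (some 1) none
  let parts0 : List (List String) := rows.map (fun _ => [])
  let parts := (PySem.List.enumerate (PySem.List.slice (finiteAutomata.headD []) (some 1) none) 1).foldl
    (fun parts jraw =>
      let symbol := PySem.Str.stripChars jraw.2 " "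
      (parts.zip rows).map (fun pr =>
        pr.1 ++ ((PySem.Str.split? (PySem.List.pyGetD pr.2 jraw.1 "") ",").getD []).map (fun t => symbol ++ t)))
    parts0
  (rows.zip parts).map (fun rp =>
    let production := rp.1.headD "" ++ "->" ++ PySem.Str.join "|" rp.2
    if setOfFinalStates.contains (rp.1.headD "") then production ++ "|epsilon" else production)

-- ===== PRECONDITION & SPEC =====
-- Pre_ excludes inputs where A raises IndexError (empty automaton, an empty row, a tail row shorter than
-- the header row) and, as a defensible unspecified corner, states containing "->" whose text before the
-- first "->" is final exactly when the full state name is not: there A's epsilon test (keyed on the first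
-- "->"-field of the production string) and B's (keyed on the state name) are both defensible readings.
def Pre_fromFiniteAutomataToRegularGrammar (finiteAutomata : List (List String)) (setOfFinalStates : List String) : Prop :=
  finiteAutomata ≠ [] ∧ (∀ row ∈ finiteAutomata, row ≠ []) ∧
  (∀ row ∈ finiteAutomata.tail, (finiteAutomata.headD []).length ≤ row.length) ∧
  (∀ row ∈ finiteAutomata.tail,
    setOfFinalStates.contains (((PySem.Str.split? (row.headD "") "->").getD []).headD "")
      = setOfFinalStates.contains (row.headD ""))
instance (finiteAutomata : List (List String)) (setOfFinalStates : List String) : Decidable (Pre_fromFiniteAutomataToRegularGrammar finiteAutomata setOfFinalStates) := by unfold Pre_fromFiniteAutomataToRegularGrammar; infer_instance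

def pvWitness_fromFiniteAutomataToRegularGrammar : List (List String) × List String :=
  ([["s", "a", "b"], ["A", "A,B", "B"], ["B", "B", ""]], ["B"])

def Spec_fromFiniteAutomataToRegularGrammar (finiteAutomata : List (List String)) (setOfFinalStates : List String) (out : List String) : Prop := out = fromFiniteAutomataToRegularGrammar_alt finiteAutomata setOfFinalStates
instance (finiteAutomata : List (List String)) (setOfFinalStates : List String) (out : List String) : Decidable (Spec_fromFiniteAutomataToRegularGrammar finiteAutomata setOfFinalStates out) := by unfold Spec_fromFiniteAutomataToRegularGrammar; infer_instance

-- ===== CLAIM (what is proved, stated in full; the proofs are below) =====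
def Claim_equal_fromFiniteAutomataToRegularGrammar : Prop := ∀ (finiteAutomata : List (List String)) (setOfFinalStates : List String), Dom_fromFiniteAutomataToRegularGrammar finiteAutomata setOfFinalStates → Pre_fromFiniteAutomataToRegularGrammar finiteAutomata setOfFinalStates → Spec_fromFiniteAutomataToRegularGrammar finiteAutomata setOfFinalStates (fromFiniteAutomataToRegularGrammar finiteAutomata setOfFinalStates)

-- ===== LEMMAS AND PROOFS =====

-- "|"-terminated concatenation of parts: what A's inner loops append after the head
def pvBars : List String → String
  | [] => ""
  | x :: xs => x ++ "|" ++ pvBars xs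

lemma pvBars_toList_cons (x : String) (xs : List String) :
    (pvBars (x :: xs)).toList = (PySem.Str.join "|" (x :: xs)).toList ++ ['|'] := by
  induction xs generalizing x with
  | nil => simp [pvBars, PySem.Str.join, PySem.Chars.join, List.intercalate]
  | cons y ys ih =>
      have hj : (PySem.Str.join "|" (x :: y :: ys)).toList
          = x.toList ++ ['|'] ++ (PySem.Str.join "|" (y :: ys)).toList := by
        simp [PySem.Str.join, PySem.Chars.join, List.intercalate]
      rw [show pvBars (x :: y :: ys) = x ++ "|" ++ pvBars (y :: ys) from rfl, hj]
      simp only [String.toList_append, ih y]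
      have hb : ("|" : String).toList = ['|'] := by decide
      simp [hb]

lemma pvFold_one (a : String) (ts : List String) (p : String) :
    ts.foldl (fun p t => p ++ a ++ t ++ "|") p = p ++ pvBars (ts.map (fun t => a ++ t)) := by
  induction ts generalizing p with
  | nil => simp [pvBars]
  | cons t ts ih =>
      rw [List.foldl_cons, ih]
      simp [pvBars, String.append_assoc]

lemma pvBars_append (l₁ l₂ : List String) : pvBars (l₁ ++ l₂) = pvBars l₁ ++ pvBars l₂ := by
  induction l₁ with
  | nil => simp [pvBars]
  | cons x xs ih => simp [pvBars, ih, String.append_assoc]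


lemma pvFold_pairs (pairs : List (String × String)) (p : String) :
    pairs.foldl (fun p pr => (((PySem.Str.split? pr.2 ",").getD []).foldl (fun p t => p ++ pr.1 ++ t ++ "|") p)) p
      = p ++ pvBars (pairs.flatMap (fun pr => ((PySem.Str.split? pr.2 ",").getD []).map (fun t => pr.1 ++ t))) := by
  induction pairs generalizing p with
  | nil => simp [pvBars]
  | cons pr rest ih =>
      rw [List.foldl_cons, pvFold_one, ih, List.flatMap_cons, pvBars_append]
      simp [String.append_assoc]

lemma pvFold_range_pairs {α β γ : Type} (dA : α) (dB : β) (g : γ → α → β → γ) :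
    ∀ (A : List α) (Rw : List β), A.length ≤ Rw.length → ∀ (c : γ),
      (List.range A.length).foldl (fun acc j => g acc (A.getD j dA) (Rw.getD j dB)) c
        = (A.zip Rw).foldl (fun acc pr => g acc pr.1 pr.2) c := by
  intro A
  induction A with
  | nil => intro Rw _ c; simp
  | cons a A' ih =>
      intro Rw h c
      cases Rw with
      | nil => simp at h
      | cons b Rw' =>
          simp only [List.length_cons, List.range_succ_eq_map, List.foldl_cons, List.foldl_map,
            List.getD_cons_succ, List.getD_cons_zero, List.zip_cons_cons]
          exact ih Rw' (by simpa using h) (g c a b)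

-- splitOn.go only ever prepends to acc
lemma pvGo_acc (sep : List Char) : ∀ (fuel : Nat) (l cur : List Char) (acc : List (List Char)),
    PySem.Chars.splitOn.go sep fuel l cur acc = acc.reverse ++ PySem.Chars.splitOn.go sep fuel l cur [] := by
  intro fuel
  induction fuel with
  | zero => intro l cur acc; simp [PySem.Chars.splitOn.go]
  | succ f ih =>
      intro l cur acc
      cases l with
      | nil => simp [PySem.Chars.splitOn.go]
      | cons c rest =>
          rw [PySem.Chars.splitOn.go, PySem.Chars.splitOn.go]
          by_cases hp : sep.isPrefixOf (c :: rest)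
          · simp only [hp, if_true]
            rw [ih _ _ (cur.reverse :: acc), ih _ _ (cur.reverse :: [])]
            simp
          · simp only [hp]
            exact ih _ _ acc

-- go's first output chunk is unchanged by whatever follows the first explicit "->"
lemma pvGo_head : ∀ (state rest cur : List Char) (fuel1 fuel2 : Nat),
    state.length < fuel1 → state.length < fuel2 →
    (PySem.Chars.splitOn.go ['-','>'] fuel1 (state ++ '-' :: '>' :: rest) cur []).headD []
      = (PySem.Chars.splitOn.go ['-','>'] fuel2 state cur []).headD [] := by
  intro state
  induction state with
  | nil =>
      intro rest cur fuel1 fuel2 h1 h2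
      cases fuel1 with
      | zero => omega
      | succ f1 =>
          cases fuel2 with
          | zero => omega
          | succ f2 =>
              simp only [List.nil_append]
              rw [PySem.Chars.splitOn.go, PySem.Chars.splitOn.go]
              have hp : List.isPrefixOf ['-','>'] ('-' :: '>' :: rest) = true := by
                simp [List.isPrefixOf]
              simp only [hp, if_true]
              rw [pvGo_acc]
              simp
              omega
  | cons c st' ih =>
      intro rest cur fuel1 fuel2 h1 h2
      cases fuel1 with
      | zero => omega
      | succ f1 =>
          cases fuel2 with
          | zero => omega
          | succ f2 =>
              simp only [List.cons_append]
              rw [PySem.Chars.splitOn.go, PySem.Chars.splitOn.go]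
              have hpe : List.isPrefixOf ['-','>'] (c :: (st' ++ '-' :: '>' :: rest))
                  = List.isPrefixOf ['-','>'] (c :: st') := by
                cases st' with
                | nil => simp [List.isPrefixOf]
                | cons d tl => simp [List.isPrefixOf]
              rw [hpe]
              by_cases hp : List.isPrefixOf ['-','>'] (c :: st') = true
              · simp only [hp, if_true]
                rw [pvGo_acc]
                conv_rhs => rw [pvGo_acc]
                simp
              · simp only [hp]
                have hh1 : st'.length < f1 := by simp only [List.length_cons] at h1; omega
                have hh2 : st'.length < f2 := by simp only [List.length_cons] at h2; omega
                exact ih rest (c :: cur) f1 f2 hh1 hh2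

lemma pvSplitOn_head (state rest : List Char) :
    (PySem.Chars.splitOn (state ++ '-' :: '>' :: rest) ['-','>']).headD []
      = (PySem.Chars.splitOn state ['-','>']).headD [] := by
  unfold PySem.Chars.splitOn
  exact pvGo_head state rest [] _ _ (by simp) (by omega)

-- the "->"-head A's second pass extracts from "state->…" depends only on the state
lemma pvHead_split (state suffix : String) :
    ((PySem.Str.split? (state ++ "->" ++ suffix) "->").getD []).headD ""
      = ((PySem.Str.split? state "->").getD []).headD "" := by
  have hmap : ∀ l : List (List Char), ((l.map String.ofList).headD "") = String.ofList (l.headD []) := by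
    intro l; cases l <;> simp
  have htl : (state ++ "->" ++ suffix).toList = state.toList ++ '-' :: '>' :: suffix.toList := by
    simp [String.toList_append]
  have hsep : ("->" : String).toList = ['-','>'] := by decide
  rw [PySem.Str.split?, PySem.Str.split?, PySem.Chars.split?, PySem.Chars.split?]
  simp only [htl, hsep]
  simp only [List.isEmpty_cons, Bool.false_eq_true, if_false, Option.map_some, Option.getD_some]
  rw [hmap, hmap, pvSplitOn_head]

-- A's build-then-strip of the trailing '|' equals B's join
lemma pvStrip_step (state : String) (parts : List String) :
    (if PySem.Str.pyGet? ((state ++ "->") ++ pvBars parts) (PySem.Str.len ((state ++ "->") ++ pvBars parts) - 1) = some '|'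
       then PySem.Str.slice ((state ++ "->") ++ pvBars parts) none (some (-1)) else (state ++ "->") ++ pvBars parts)
    = state ++ "->" ++ PySem.Str.join "|" parts := by
  have harr : ("->" : String).toList = ['-','>'] := by decide
  have hlen : ∀ t : String, PySem.Str.len t = ↑(t.toList.length) := by intro t; simp [pysem]
  cases parts with
  | nil =>
      have hBt : ((state ++ "->") ++ pvBars []).toList = state.toList ++ ['-','>'] := by
        simp [pvBars, String.toList_append, harr]
      have hidx : (↑(((state ++ "->") ++ pvBars []).toList.length) - 1 : Int)
          = ↑(state.toList.length + 1) := by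
        rw [hBt]; push_cast; simp; ring
      have hcond : PySem.Str.pyGet? ((state ++ "->") ++ pvBars []) (PySem.Str.len ((state ++ "->") ++ pvBars []) - 1) = some '>' := by
        rw [hlen, hidx, PySem.Str.pyGet?_natCast, hBt]
        rw [show state.toList ++ ['-','>'] = (state.toList ++ ['-']) ++ ['>'] by simp]
        rw [List.getElem?_append_right (by simp)]
        simp
      rw [hcond]
      simp only [Option.some.injEq]
      rw [if_neg (by simp)]
      apply String.toList_inj.mp
      have hj : (PySem.Str.join "|" ([] : List String)) = "" := by
        simp [PySem.Str.join, PySem.Chars.join, List.intercalate]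
      simp [pvBars, hj]
  | cons q qs =>
      have hBt : ((state ++ "->") ++ pvBars (q :: qs)).toList
          = (state.toList ++ ['-','>'] ++ (PySem.Str.join "|" (q :: qs)).toList) ++ ['|'] := by
        simp [String.toList_append, harr, pvBars_toList_cons]
      have hidx : (↑(((state ++ "->") ++ pvBars (q :: qs)).toList.length) - 1 : Int)
          = ↑((state.toList ++ ['-','>'] ++ (PySem.Str.join "|" (q :: qs)).toList).length) := by
        rw [hBt]; simp; omega
      have hcond : PySem.Str.pyGet? ((state ++ "->") ++ pvBars (q :: qs)) (PySem.Str.len ((state ++ "->") ++ pvBars (q :: qs)) - 1) = some '|' := by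
        rw [hlen, hidx, PySem.Str.pyGet?_natCast, hBt]
        rw [List.getElem?_append_right (by simp)]
        simp
      rw [hcond, if_pos rfl]
      apply String.toList_inj.mp
      rw [PySem.Str.slice_to_neg_one, hBt]
      rw [show state.toList ++ ['-','>'] ++ (PySem.Str.join "|" (q :: qs)).toList ++ ['|']
            = (state.toList ++ ['-','>'] ++ (PySem.Str.join "|" (q :: qs)).toList) ++ ['|'] by simp]
      rw [List.dropLast_concat]
      simp [String.toList_append, harr]

-- named pieces of the two ports (used only by the proofs)
def pvProdA (fa : List (List String)) (alphabet setOfStates : List String) (i : Int) : String :=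
  let production := PySem.List.pyGetD setOfStates i "" ++ "->"
  let production := (PySem.List.pyRange 0 alphabet.length 1).foldl (fun production j =>
    let listOfState := (PySem.Str.split? (PySem.List.pyGetD (PySem.List.pyGetD fa (i+1) []) (j+1) "") ",").getD []
    listOfState.foldl (fun production state => production ++ PySem.List.pyGetD alphabet j "" ++ state ++ "|") production) production
  if PySem.Str.pyGet? production (PySem.Str.len production - 1) = some '|'
    then PySem.Str.slice production none (some (-1)) else production

def pvEpsA (fin : List String) (g : String) : String :=
  if fin.contains (((PySem.Str.split? g "->").getD []).headD "") then g ++ "|epsilon" else g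

def pvRowB (alphabet fin : List String) (row : List String) : String :=
  let state := row.headD ""
  let parts := (alphabet.zip (PySem.List.slice row (some 1) none)).flatMap (fun sc =>
    ((PySem.Str.split? sc.2 ",").getD []).map (fun t => sc.1 ++ t))
  let production := state ++ "->" ++ PySem.Str.join "|" parts
  if fin.contains state then production ++ "|epsilon" else production

lemma pvA_eq (fa : List (List String)) (fin : List String) :
    fromFiniteAutomataToRegularGrammar fa fin =
      ((PySem.List.pyRange 0 (pvGetSetOfStates fa).length 1).foldl
        (fun rg i => rg ++ [pvProdA fa (pvGetAlphabet fa) (pvGetSetOfStates fa) i]) []).foldl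
        (fun acc g => acc ++ [pvEpsA fin g]) [] := rfl

lemma pvElem (r0 : List String) (rs : List (List String)) (alphabet fin : List String) (k : Nat)
    (hk : k < rs.length) (s0 : String) (rt : List String) (hr : rs[k] = s0 :: rt)
    (hlen : alphabet.length ≤ rt.length)
    (heq : fin.contains (((PySem.Str.split? s0 "->").getD []).headD "") = fin.contains s0) :
    pvEpsA fin (pvProdA (r0 :: rs) alphabet (rs.map (fun row => row.headD "")) (k : Int))
      = pvRowB alphabet fin (s0 :: rt) := by
  have hcast : ∀ j : Nat, ((j : Int) + 1) = ((j + 1 : Nat) : Int) := by intro j; push_cast; ring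
  have hstate : PySem.List.pyGetD (rs.map (fun row => row.headD "")) (k : Int) "" = s0 := by
    rw [PySem.List.pyGetD_natCast, List.getD_eq_getElem _ _ (by simpa using hk)]
    simp [hr]
  have hrowk : PySem.List.pyGetD (r0 :: rs) ((k : Int) + 1) [] = s0 :: rt := by
    rw [hcast k, PySem.List.pyGetD_natCast, List.getD_cons_succ, List.getD_eq_getElem _ _ hk, hr]
  unfold pvProdA
  simp only [hstate, hrowk]
  rw [PySem.List.pyRange_zero_natCast, List.foldl_map]
  simp only [hcast, PySem.List.pyGetD_natCast, List.getD_cons_succ]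
  rw [pvFold_range_pairs "" "" (fun p a b => ((PySem.Str.split? b ",").getD []).foldl (fun p t => p ++ a ++ t ++ "|") p) alphabet rt hlen]
  rw [pvFold_pairs]
  rw [pvStrip_step]
  unfold pvEpsA pvRowB
  rw [pvHead_split, heq]
  simp [PySem.List.slice_from_one]

-- B-side: the column-major fold distributes over the rows
lemma pvColFold (rows : List (List String)) (g : Int × String → List String → List String) :
    ∀ (es : List (Int × String)) (parts : List (List String)), parts.length = rows.length →
    es.foldl (fun ps e => (ps.zip rows).map (fun pr => pr.1 ++ g e pr.2)) parts
      = (parts.zip rows).map (fun pr => pr.1 ++ es.flatMap (fun e => g e pr.2)) := by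
  intro es
  induction es with
  | nil =>
      intro parts h
      simp only [List.foldl_nil, List.flatMap_nil, List.append_nil]
      have := List.map_fst_zip (l₁ := parts) (l₂ := rows) h.le
      simpa using this.symm
  | cons e es ih =>
      intro parts h
      rw [List.foldl_cons, ih _ (by simp [h])]
      apply List.ext_getElem (by simp [h])
      intro i h1 h2
      simp [List.getElem_zip, List.flatMap_cons]

-- enumerate-with-start indexing equals zipping with the dropped row
lemma pvEnumFlat (G : String → String → List String) :
    ∀ (xs : List String) (s : Nat) (row : List String), s + xs.length ≤ row.length →
    (PySem.List.enumerate xs (s : Int)).flatMap (fun e => G e.2 (PySem.List.pyGetD row e.1 ""))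
      = (xs.zip (row.drop s)).flatMap (fun p => G p.1 p.2) := by
  intro xs
  induction xs with
  | nil => intro s row h; simp [PySem.List.enumerate_nil]
  | cons x xs ih =>
      intro s row h
      have hs : s < row.length := by simp only [List.length_cons] at h; omega
      rw [PySem.List.enumerate_cons, List.flatMap_cons]
      have h1 : ((s : Int) + 1) = ((s + 1 : Nat) : Int) := by push_cast; ring
      rw [h1, ih (s + 1) row (by simp only [List.length_cons] at h ⊢; omega)]
      rw [List.drop_eq_getElem_cons hs, List.zip_cons_cons, List.flatMap_cons]
      rw [PySem.List.pyGetD_natCast, List.getD_eq_getElem _ _ hs]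

-- B equals the row-major map
lemma pvB_map (r0 : List String) (rs : List (List String)) (fin : List String)
    (hrows : ∀ row ∈ rs, row ≠ []) (hlen : ∀ row ∈ rs, r0.length ≤ row.length) :
    fromFiniteAutomataToRegularGrammar_alt (r0 :: rs) fin
      = rs.map (pvRowB ((r0.map (fun s => PySem.Str.stripChars s " ")).tail) fin) := by
  unfold fromFiniteAutomataToRegularGrammar_alt
  simp only [PySem.List.slice_from_one, List.tail_cons, List.headD_cons]
  rw [pvColFold rs
    (fun jraw row => ((PySem.Str.split? (PySem.List.pyGetD row jraw.1 "") ",").getD []).map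
      (fun t => PySem.Str.stripChars jraw.2 " " ++ t))
    (PySem.List.enumerate r0.tail 1) (rs.map (fun _ => [])) (by simp)]
  apply List.ext_getElem (by simp)
  intro i h1 h2
  have hi : i < rs.length := by simpa using h2
  simp only [List.getElem_map, List.getElem_zip, List.nil_append]
  have hrne : rs[i] ≠ [] := hrows rs[i] (List.getElem_mem _)
  obtain ⟨s0, rt, hr⟩ := List.exists_cons_of_ne_nil hrne
  cases r0 with
  | nil =>
      rw [hr]
      simp [pvRowB, PySem.List.enumerate_nil, PySem.List.slice_from_one]
  | cons h0 htl =>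
      have hl := hlen rs[i] (List.getElem_mem _)
      rw [hr] at hl
      simp only [List.length_cons] at hl
      have hflat : (PySem.List.enumerate htl ((1 : Nat) : Int)).flatMap
          (fun e => ((PySem.Str.split? (PySem.List.pyGetD (s0 :: rt) e.1 "") ",").getD []).map
            (fun t => PySem.Str.stripChars e.2 " " ++ t))
          = (htl.zip ((s0 :: rt).drop 1)).flatMap
            (fun p => ((PySem.Str.split? p.2 ",").getD []).map (fun t => PySem.Str.stripChars p.1 " " ++ t)) :=
        pvEnumFlat (fun raw cell => ((PySem.Str.split? cell ",").getD []).map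
            (fun t => PySem.Str.stripChars raw " " ++ t)) htl 1 (s0 :: rt) (by simp only [List.length_cons]; omega)
      rw [hr]
      simp only [List.tail_cons]
      have hcast1 : ((1 : Int)) = ((1 : Nat) : Int) := by norm_num
      rw [hcast1, hflat]
      unfold pvRowB
      simp only [List.headD_cons, PySem.List.slice_from_one, List.tail_cons, List.drop_one]
      simp [List.zip_map_left, List.flatMap_map, Prod.map]

-- A equals the row-major map
lemma pvA_map (r0 : List String) (rs : List (List String)) (fin : List String)
    (hrows : ∀ row ∈ r0 :: rs, row ≠ [])
    (hlen : ∀ row ∈ rs, r0.length ≤ row.length)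
    (hno : ∀ row ∈ rs, fin.contains (((PySem.Str.split? (row.headD "") "->").getD []).headD "")
      = fin.contains (row.headD "")) :
    fromFiniteAutomataToRegularGrammar (r0 :: rs) fin
      = rs.map (pvRowB ((r0.map (fun s => PySem.Str.stripChars s " ")).tail) fin) := by
  have hAlpha : pvGetAlphabet (r0 :: rs)
      = (r0.map (fun s => PySem.Str.stripChars s " ")).tail := by
    unfold pvGetAlphabet
    rw [PySem.List.foldl_append_singleton_eq_map, PySem.List.slice_from_one]
    simp
  have hStates : pvGetSetOfStates (r0 :: rs) = rs.map (fun row => row.headD "") := by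
    unfold pvGetSetOfStates
    rw [PySem.List.foldl_append_singleton_eq_map, PySem.List.slice_from_one]
    simp
  rw [pvA_eq]
  rw [PySem.List.foldl_append_singleton_eq_map, PySem.List.foldl_append_singleton_eq_map]
  simp only [List.nil_append, hAlpha, hStates, List.length_map]
  rw [PySem.List.pyRange_zero_natCast, List.map_map, List.map_map]
  apply List.ext_getElem (by simp)
  intro k h1 h2
  simp only [List.getElem_map, List.getElem_range, Function.comp_apply]
  have hk : k < rs.length := by simpa using h2
  have hmem : rs[k] ∈ rs := List.getElem_mem _
  have hrne : rs[k] ≠ [] := hrows rs[k] (List.mem_cons_of_mem _ hmem)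
  obtain ⟨s0, rt, hr⟩ := List.exists_cons_of_ne_nil hrne
  have hr0ne : r0 ≠ [] := hrows r0 List.mem_cons_self
  have hlenk : (r0.map (fun s => PySem.Str.stripChars s " ")).tail.length ≤ rt.length := by
    have h1 := hlen rs[k] hmem
    have h2 : 1 ≤ r0.length := List.length_pos_of_ne_nil hr0ne
    have h3 : rs[k].length = rt.length + 1 := by rw [hr]; simp
    simp only [List.length_tail, List.length_map]
    omega
  have heqk : fin.contains (((PySem.Str.split? s0 "->").getD []).headD "") = fin.contains s0 := by
    have := hno rs[k] hmem
    rwa [hr, List.headD_cons] at this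
  rw [hr]
  exact pvElem r0 rs _ fin k hk s0 rt hr hlenk heqk

-- ===== VERDICT (by name: the statement is the Claim_ definition above) =====
theorem fromFiniteAutomataToRegularGrammar_spec : Claim_equal_fromFiniteAutomataToRegularGrammar := by
  intro fa fin _hdom hpre
  obtain ⟨hne, hrows, hlen, hno⟩ := hpre
  unfold Spec_fromFiniteAutomataToRegularGrammar
  cases fa with
  | nil => exact absurd rfl hne
  | cons r0 rs =>
      rw [pvA_map r0 rs fin hrows hlen hno,
          pvB_map r0 rs fin (fun row hm => hrows row (List.mem_cons_of_mem _ hm)) hlen]
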